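-- pv_equiv track=rewrite | github.com/NixOS/nixpkgs | pkgs/by-name/fl/flattenReferencesGraph/src/flatten_references_graph/popularity_contest.py | order_by_popularity
-- ===== SOURCE A (Python) =====
-- from collections import defaultdict
--
-- def order_by_popularity(paths):
--     paths_by_popularity = defaultdict(list)
--     popularities = []
--     for path, popularity in paths.items():
--         popularities.append(popularity)
--         paths_by_popularity[popularity].append(path)
--
--     popularities = sorted(set(popularities))
--
--     flat_ordered = []
--     for popularity in popularities:
--         paths = paths_by_popularity[popularity]
--         paths.sort(key=package_name)
--
--         flat_ordered.extend(reversed(paths))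
--     return list(reversed(flat_ordered))
--
-- def package_name(path):
--     parts = path.split('-')
--     start = parts.pop(0)
--     # don't throw away any data, so the order is always the same.
--     # even in cases where only the hash at the start has changed.
--     parts.append(start)
--     return '-'.join(parts)
-- ===== SOURCE B (Python) =====
-- def order_by_popularity(paths):
--     return sorted(paths, key=lambda path: (-paths[path], package_name(path)))
--
-- def package_name(path):
--     parts = path.split('-')
--     start = parts.pop(0)
--     # don't throw away any data, so the order is always the same.
--     # even in cases where only the hash at the start has changed.
--     parts.append(start)
--     return '-'.join(parts)
-- ===== Notes on version B (the rewrite author's own statement) =====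
-- stated objective: simpler
-- what changed: Replaced the defaultdict bucketing, per-bucket sorts and double reversal with a single stable sort of the keys under the composite key (-popularity, package_name(path)).
import Mathlib
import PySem

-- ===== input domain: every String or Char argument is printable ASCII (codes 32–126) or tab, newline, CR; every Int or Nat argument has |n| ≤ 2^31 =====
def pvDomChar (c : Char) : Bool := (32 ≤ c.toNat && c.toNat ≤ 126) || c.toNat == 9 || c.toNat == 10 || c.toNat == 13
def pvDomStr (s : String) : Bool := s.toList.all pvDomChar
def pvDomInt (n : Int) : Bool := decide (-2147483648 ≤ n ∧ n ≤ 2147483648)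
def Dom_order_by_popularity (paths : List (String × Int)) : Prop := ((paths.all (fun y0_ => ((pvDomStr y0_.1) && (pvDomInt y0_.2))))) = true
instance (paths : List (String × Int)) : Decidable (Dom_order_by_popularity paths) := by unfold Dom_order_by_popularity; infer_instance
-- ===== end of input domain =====

-- B replaces A's defaultdict bucketing + per-bucket sorts + double reversal by ONE sort
-- with the composite key (-popularity, package_name(path)) — simpler, same result.

-- ===== PORT A =====
-- helper shared by Source A and Source B (Source B keeps it unchanged)
def package_name (path : String) : String :=
  match PySem.Str.split? path "-" with
  | some (start :: rest) => PySem.Str.join "-" (rest ++ [start])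
  | _ => path  -- unreachable: the separator "-" is nonempty and split never returns an empty list

def order_by_popularity (paths : List (String × Int)) : List String :=
  let st := paths.foldl
    (fun (st : PySem.Dict Int (List String) × List Int) pp =>
      (st.1.modify pp.2 [] (fun ps => ps ++ [pp.1]), st.2 ++ [pp.2]))
    (PySem.Dict.empty, [])
  let popularities := PySem.List.sorted (PySem.Set.ofList st.2) (fun x => x)
  let flat_ordered := popularities.foldl
    (fun acc popularity =>
      acc ++ (PySem.List.sorted (st.1.getD popularity []) package_name).reverse) []
  flat_ordered.reverse

-- ===== PORT B =====
def order_by_popularity_alt (paths : List (String × Int)) : List String :=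
  -- sorted(paths, key=lambda path: (-paths[path], package_name(path)));
  -- paths[path] is the dict lookup: every key iterated is present, the default 0 is unreachable
  PySem.List.sorted2 (paths.map Prod.fst)
    (fun path => -((PySem.Dict.mk paths).getD path 0))
    (fun path => package_name path)

-- ===== PRECONDITION & SPEC =====
-- paths models a Python dict, whose keys are unique; association lists with a duplicated
-- key represent no dict input at all, so they are excluded.
def Pre_order_by_popularity (paths : List (String × Int)) : Prop :=
  (paths.map Prod.fst).Nodup
instance (paths : List (String × Int)) : Decidable (Pre_order_by_popularity paths) := by
  unfold Pre_order_by_popularity; infer_instance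

def pvWitness_order_by_popularity : (List (String × Int)) := [("a-b", 1), ("c", 2)]

def Spec_order_by_popularity (paths : List (String × Int)) (out : List String) : Prop := out = order_by_popularity_alt paths
instance (paths : List (String × Int)) (out : List String) : Decidable (Spec_order_by_popularity paths out) := by unfold Spec_order_by_popularity; infer_instance

-- ===== CLAIM (what is proved, stated in full; the proofs are below) =====
def Claim_equal_order_by_popularity : Prop := ∀ (paths : List (String × Int)), Dom_order_by_popularity paths → Pre_order_by_popularity paths → Spec_order_by_popularity paths (order_by_popularity paths)

-- ===== LEMMAS AND PROOFS =====

-- Python's str.split with a single-character separator, as a structural recursion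
def pvSplitc (c : Char) : List Char → List (List Char)
  | [] => [[]]
  | a :: t => match pvSplitc c t with
    | [] => [[]]  -- unreachable
    | p :: ps => if a = c then [] :: p :: ps else (a :: p) :: ps

-- '-'.join, as a structural recursion
def pvJoinc (c : Char) : List (List Char) → List Char
  | [] => []
  | [p] => p
  | p :: ps => p ++ c :: pvJoinc c ps

theorem pvSplitc_ne_nil (c : Char) (s : List Char) : pvSplitc c s ≠ [] := by
  cases s with
  | nil => simp [pvSplitc]
  | cons a t =>
    cases h : pvSplitc c t with
    | nil => simp [pvSplitc, h]
    | cons p ps => simp only [pvSplitc, h]; split <;> simp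

theorem pv_go_single (c : Char) :
    ∀ (fuel : Nat) (l cur : List Char) (acc : List (List Char)), l.length < fuel →
    PySem.Chars.splitOn.go [c] fuel l cur acc =
      acc.reverse ++ (match pvSplitc c l with
        | [] => []
        | p :: ps => (cur.reverse ++ p) :: ps) := by
  intro fuel
  induction fuel with
  | zero => intro l cur acc h; omega
  | succ f ih =>
    intro l cur acc h
    cases l with
    | nil =>
      rw [PySem.Chars.splitOn.go.eq_def]
      simp [pvSplitc]
    | cons a rest =>
      rw [PySem.Chars.splitOn.go.eq_def]
      by_cases hac : a = c
      · have hpre : List.isPrefixOf [c] (a :: rest) = true := by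
          simp [List.isPrefixOf, hac]
        simp only [hpre, if_true, List.drop_succ_cons, List.drop_zero, List.length]
        rw [ih rest [] (cur.reverse :: acc) (by simpa using Nat.lt_of_succ_lt_succ h)]
        cases hsp : pvSplitc c rest with
        | nil => exact absurd hsp (pvSplitc_ne_nil c rest)
        | cons p ps => simp [pvSplitc, hac, hsp]
      · have hpre : List.isPrefixOf [c] (a :: rest) = false := by
          simp [List.isPrefixOf]; exact fun hh => absurd hh.symm (by simpa using hac)
        simp only [hpre, Bool.false_eq_true, if_false]
        rw [ih rest (a :: cur) acc (by simpa using Nat.lt_of_succ_lt_succ h)]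
        cases hsp : pvSplitc c rest with
        | nil => exact absurd hsp (pvSplitc_ne_nil c rest)
        | cons p ps => simp [pvSplitc, hac, hsp]

theorem pvSplitc_free (c : Char) (s : List Char) : ∀ p ∈ pvSplitc c s, c ∉ p := by
  induction s with
  | nil => simp [pvSplitc]
  | cons a t ih =>
    cases hsp : pvSplitc c t with
    | nil => exact absurd hsp (pvSplitc_ne_nil c t)
    | cons p ps =>
      rw [hsp] at ih
      by_cases hac : a = c
      · simp only [pvSplitc, hsp, if_pos hac]
        intro q hq
        simp only [List.mem_cons] at hq
        rcases hq with rfl | rfl | hq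
        · simp
        · exact ih q (by simp)
        · exact ih q (by simp [hq])
      · simp only [pvSplitc, hsp, if_neg hac]
        intro q hq
        simp only [List.mem_cons] at hq
        rcases hq with rfl | hq
        · intro hc
          simp only [List.mem_cons] at hc
          rcases hc with hc | hc
          · exact hac hc.symm
          · exact ih p (by simp) hc
        · exact ih q (by simp [hq])

theorem pvSplitc_free_single (c : Char) (l : List Char) (h : c ∉ l) :
    pvSplitc c l = [l] := by
  induction l with
  | nil => simp [pvSplitc]
  | cons a t ih =>
    simp only [List.mem_cons, not_or] at h
    simp only [pvSplitc, ih h.2]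
    rw [if_neg (fun hh => h.1 hh.symm)]

theorem pvSplitc_append (c : Char) (l t : List Char) (h : c ∉ l) :
    pvSplitc c (l ++ c :: t) = l :: pvSplitc c t := by
  induction l with
  | nil =>
    simp only [List.nil_append]
    cases hsp : pvSplitc c t with
    | nil => exact absurd hsp (pvSplitc_ne_nil c t)
    | cons p ps => simp [pvSplitc, hsp]
  | cons a l' ih =>
    simp only [List.mem_cons, not_or] at h
    rw [List.cons_append]
    simp only [pvSplitc, ih h.2]
    simp [Ne.symm h.1]

theorem pvJoinc_splitc (c : Char) (s : List Char) : pvJoinc c (pvSplitc c s) = s := by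
  induction s with
  | nil => simp [pvSplitc, pvJoinc]
  | cons a t ih =>
    cases hsp : pvSplitc c t with
    | nil => exact absurd hsp (pvSplitc_ne_nil c t)
    | cons p ps =>
      rw [hsp] at ih
      by_cases hac : a = c
      · simp only [pvSplitc, hsp, if_pos hac]
        cases ps with
        | nil => simp [pvJoinc] at ih ⊢; simp [hac, ih]
        | cons q qs => simp [pvJoinc] at ih ⊢; simp [hac, ih]
      · simp only [pvSplitc, hsp, if_neg hac]
        cases ps with
        | nil => simp [pvJoinc] at ih ⊢; simp [ih]
        | cons q qs => simp [pvJoinc] at ih ⊢; simp [ih]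

theorem pvSplitc_joinc (c : Char) (ls : List (List Char)) (hfree : ∀ p ∈ ls, c ∉ p)
    (hne : ls ≠ []) : pvSplitc c (pvJoinc c ls) = ls := by
  induction ls with
  | nil => exact absurd rfl hne
  | cons p ps ih =>
    cases ps with
    | nil =>
      show pvSplitc c (pvJoinc c [p]) = [p]
      rw [show pvJoinc c [p] = p from rfl]
      exact pvSplitc_free_single c p (hfree p (by simp))
    | cons q qs =>
      rw [show pvJoinc c (p :: q :: qs) = p ++ c :: pvJoinc c (q :: qs) from rfl]
      rw [pvSplitc_append c p _ (hfree p (by simp))]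
      rw [ih (fun r hr => hfree r (by simp [hr])) (by simp)]

theorem pv_splitOn_single (c : Char) (s : List Char) :
    PySem.Chars.splitOn s [c] = pvSplitc c s := by
  unfold PySem.Chars.splitOn
  rw [pv_go_single c (s.length + 1) s [] [] (by omega)]
  cases hsp : pvSplitc c s with
  | nil => exact absurd hsp (pvSplitc_ne_nil c s)
  | cons p ps => simp

theorem pv_join_single (c : Char) (ls : List (List Char)) :
    PySem.Chars.join [c] ls = pvJoinc c ls := by
  rw [PySem.Chars.join.eq_1]
  induction ls with
  | nil => simp [pvJoinc, List.intercalate]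
  | cons p ps ih =>
    cases ps with
    | nil => simp [pvJoinc, List.intercalate]
    | cons q qs =>
      rw [show pvJoinc c (p :: q :: qs) = p ++ c :: pvJoinc c (q :: qs) from rfl, ← ih]
      simp [List.intercalate]

theorem pv_split_dash (path : String) :
    PySem.Str.split? path "-" = some ((pvSplitc '-' path.toList).map String.ofList) := by
  rw [PySem.Str.split?.eq_1]
  rw [show ("-" : String).toList = ['-'] from rfl]
  rw [PySem.Chars.split?.eq_1]
  simp [pv_splitOn_single]

theorem package_name_toList (path : String) (p : List Char) (ps : List (List Char))
    (h : pvSplitc '-' path.toList = p :: ps) :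
    (package_name path).toList = pvJoinc '-' (ps ++ [p]) := by
  unfold package_name
  rw [pv_split_dash, h]
  simp only [List.map_cons]
  rw [PySem.Str.join.eq_1]
  rw [show ("-" : String).toList = ['-'] from rfl]
  simp [pv_join_single, List.map_map, Function.comp_def]

theorem package_name_inj : Function.Injective package_name := by
  intro x y h
  obtain ⟨p, ps, hx⟩ : ∃ p ps, pvSplitc '-' x.toList = p :: ps := by
    cases hsp : pvSplitc '-' x.toList with
    | nil => exact absurd hsp (pvSplitc_ne_nil _ _)
    | cons p ps => exact ⟨p, ps, rfl⟩
  obtain ⟨q, qs, hy⟩ : ∃ q qs, pvSplitc '-' y.toList = q :: qs := by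
    cases hsp : pvSplitc '-' y.toList with
    | nil => exact absurd hsp (pvSplitc_ne_nil _ _)
    | cons q qs => exact ⟨q, qs, rfl⟩
  have hj : pvJoinc '-' (ps ++ [p]) = pvJoinc '-' (qs ++ [q]) := by
    rw [← package_name_toList x p ps hx, ← package_name_toList y q qs hy, h]
  have hfree1 : ∀ r ∈ ps ++ [p], '-' ∉ r := by
    intro r hr
    apply pvSplitc_free '-' x.toList
    rw [hx]
    simp only [List.mem_append, List.mem_cons] at hr ⊢
    tauto
  have hfree2 : ∀ r ∈ qs ++ [q], '-' ∉ r := by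
    intro r hr
    apply pvSplitc_free '-' y.toList
    rw [hy]
    simp only [List.mem_append, List.mem_cons] at hr ⊢
    tauto
  have heq : ps ++ [p] = qs ++ [q] := by
    rw [← pvSplitc_joinc '-' (ps ++ [p]) hfree1 (by simp),
        ← pvSplitc_joinc '-' (qs ++ [q]) hfree2 (by simp), hj]
  obtain ⟨hps, hp⟩ := List.concat_inj.mp (by simpa [List.concat] using heq)
  have : x.toList = y.toList := by
    rw [← pvJoinc_splitc '-' x.toList, ← pvJoinc_splitc '-' y.toList, hx, hy, hps, hp]
  exact String.toList_inj.mp this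

theorem pv_getD_mk_of_mem (l : List (String × Int)) (s : String) (v : Int)
    (h : (l.map Prod.fst).Nodup) (hmem : (s, v) ∈ l) :
    (PySem.Dict.mk l).getD s 0 = v := by
  have : (PySem.Dict.mk l).get? s = some v := by
    induction l with
    | nil => simp at hmem
    | cons kv rest ih =>
      rw [show PySem.Dict.mk (kv :: rest) = PySem.Dict.mk ((kv.1, kv.2) :: rest) by simp]
      rw [PySem.Dict.get?_mk_cons]
      simp only [List.map_cons, List.nodup_cons] at h
      rcases List.mem_cons.mp hmem with heq | hmem'
      · simp [← heq]
      · have hne : kv.1 ≠ s := by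
          intro hk
          exact h.1 (hk ▸ (List.mem_map.mpr ⟨(s, v), hmem', rfl⟩))
        simp [hne, ih h.2 hmem']
  simp [PySem.Dict.getD, this]

theorem pv_flatMap_filter_perm (R : List Int) :
    ∀ (l : List (String × Int)), R.Nodup → (∀ pp ∈ l, pp.2 ∈ R) →
    (R.flatMap (fun v => (l.filter (fun pp => pp.2 == v)).map Prod.fst)).Perm
      (l.map Prod.fst) := by
  induction R with
  | nil =>
    intro l _ hmem
    cases l with
    | nil => simp
    | cons pp rest => exact absurd (hmem pp (by simp)) (by simp)
  | cons v R' ih =>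
    intro l hnd hmem
    rw [List.flatMap_cons]
    simp only [List.nodup_cons] at hnd
    have hcongr : R'.flatMap (fun w => (l.filter (fun pp => pp.2 == w)).map Prod.fst)
        = R'.flatMap (fun w => ((l.filter (fun pp => !(pp.2 == v))).filter (fun pp => pp.2 == w)).map Prod.fst) := by
      simp only [List.flatMap_def]
      apply congrArg
      apply List.map_congr_left
      intro w hw
      have hvw : w ≠ v := fun hh => hnd.1 (hh ▸ hw)
      rw [List.filter_filter]
      apply congrArg
      apply List.filter_congr
      intro pp _
      by_cases hpw : pp.2 = w
      · simp [hpw, hvw]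
      · simp [hpw]
    rw [hcongr]
    have htail := ih (l.filter (fun pp => !(pp.2 == v))) hnd.2 (by
      intro pp hpp
      have h1 := List.of_mem_filter hpp
      have h2 := hmem pp (List.mem_of_mem_filter hpp)
      simp only [List.mem_cons] at h2
      rcases h2 with h2 | h2
      · simp [h2] at h1
      · exact h2)
    refine List.Perm.trans (List.Perm.append_left _ htail) ?_
    rw [← List.map_append]
    exact List.Perm.map _ (List.filter_append_perm _ l)

theorem pv_sorted2_eq_sorted_lex (xs : List String) (k1 : String → Int) (k2 : String → String) :
    PySem.List.sorted2 xs k1 k2 = PySem.List.sorted xs (fun a => toLex (k1 a, k2 a)) := by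
  unfold PySem.List.sorted2 PySem.List.sorted
  simp only []
  congr 1
  funext acc x
  congr 1
  funext a b
  rcases lt_trichotomy (k1 a) (k1 b) with h | h | h
  · simp [h, Prod.Lex.lt_iff]
  · simp [h, Prod.Lex.lt_iff]
  · have h1 : ¬ k1 a < k1 b := not_lt_of_gt h
    have h2 : ¬ k1 b < k1 a → False := fun hh => hh h
    simp [h, h1, Prod.Lex.lt_iff]
    intro hab
    exact absurd hab h.ne'

-- membership in a bucket determines the path's popularity
theorem pv_bucket_mem (paths : List (String × Int)) (v : Int) (x : String)
    (hx : x ∈ (paths.filter (fun pp => pp.2 == v)).map Prod.fst) : (x, v) ∈ paths := by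
  rcases List.mem_map.mp hx with ⟨pp, hpp, rfl⟩
  have h1 := List.of_mem_filter hpp
  have h2 := List.mem_of_mem_filter hpp
  have : pp.2 = v := by simpa using h1
  exact this ▸ (by simpa using h2)

-- ===== VERDICT (by name: the statement is the Claim_ definition above) =====
theorem order_by_popularity_spec : Claim_equal_order_by_popularity := by
  intro paths _ hpre
  unfold Pre_order_by_popularity at hpre
  unfold Spec_order_by_popularity order_by_popularity order_by_popularity_alt
  rw [pv_sorted2_eq_sorted_lex]
  simp only [PySem.List.foldl_prod_mk
      (f := fun (d : PySem.Dict Int (List String)) (pp : String × Int) =>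
        d.modify pp.2 [] (fun ps => ps ++ [pp.1]))
      (g := fun (l : List Int) (pp : String × Int) => l ++ [pp.2]),
    PySem.List.foldl_append_singleton_eq_map, List.nil_append,
    PySem.List.foldl_append_eq_flatMap]
  set pkg : String → String := package_name with hpkg
  set k : String → Lex (Int × String) :=
    fun a => toLex (-((PySem.Dict.mk paths).getD a 0), package_name a) with hk
  set D : PySem.Dict Int (List String) :=
    paths.foldl (fun d pp => d.modify pp.2 [] (fun ps => ps ++ [pp.1])) PySem.Dict.empty with hD
  set P : List Int :=
    PySem.List.sorted (PySem.Set.ofList (paths.map (fun pp => pp.2))) (fun x => x) with hP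
  have hbucket : ∀ v : Int, D.getD v [] = (paths.filter (fun pp => pp.2 == v)).map Prod.fst := by
    intro v
    have h := PySem.Dict.getD_foldl_modify_append
      (paths.map (fun pp => (pp.2, pp.1))) (PySem.Dict.empty) v
    rw [List.foldl_map] at h
    rw [hD, h]
    simp [List.filter_map, List.map_map, Function.comp_def]
  have hlex : ∀ (v : Int) (x : String),
      x ∈ PySem.List.sorted (D.getD v []) package_name → k x = toLex (-v, package_name x) := by
    intro v x hx
    rw [PySem.List.mem_sorted, hbucket] at hx
    have hxv := pv_bucket_mem paths v x hx
    rw [hk]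
    simp [pv_getD_mk_of_mem paths x v hpre hxv]
  -- the flattened descending traversal
  rw [List.reverse_flatMap]
  simp only [Function.comp_def, List.reverse_reverse]
  -- name the sorted order
  refine (PySem.List.sorted_eq_of_perm_of_pairwise_lt _ _ _ ?_ ?_).symm
  · -- permutation
    refine List.Perm.trans (List.Perm.flatMap_left P.reverse (fun v _ => ?_))
      (pv_flatMap_filter_perm P.reverse paths ?_ ?_)
    · rw [hbucket v]
      exact PySem.List.sorted_perm _ _ _
    · rw [hP]
      exact List.nodup_reverse.mpr
        ((PySem.List.sorted_perm (PySem.Set.ofList (paths.map (fun pp => pp.2)))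
          (fun x => x) false).symm.nodup (PySem.Set.nodup_ofList _))
    · intro pp hpp
      rw [List.mem_reverse, hP, PySem.List.mem_sorted]
      rw [PySem.Set.mem_ofList]
      exact List.mem_map.mpr ⟨pp, hpp, rfl⟩
  · -- strict pairwise ordering under the composite key
    rw [List.flatMap_def, List.pairwise_flatten]
    constructor
    · -- within a block: same popularity, strictly increasing package_name
      intro block hblock
      rcases List.mem_map.mp hblock with ⟨v, hv, rfl⟩
      have hnd : (PySem.List.sorted (D.getD v []) package_name).Nodup := by
        refine (PySem.List.sorted_perm (D.getD v []) package_name false).symm.nodup ?_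
        rw [hbucket]
        exact List.Nodup.sublist (List.Sublist.map Prod.fst (List.filter_sublist (l := paths))) hpre
      have hple := PySem.List.sorted_pairwise (D.getD v []) package_name
      refine List.Pairwise.imp_of_mem ?_ (hple.and (List.nodup_iff_pairwise_ne.mp hnd))
      intro a b ha hb hab
      rw [hlex v a ha, hlex v b hb]
      rw [Prod.Lex.lt_iff]
      right
      refine ⟨rfl, ?_⟩
      exact lt_of_le_of_ne hab.1 (fun hh => hab.2 (package_name_inj hh))
    · -- across blocks: strictly decreasing popularity
      have hPlt : P.reverse.Pairwise (fun v w : Int => w < v) := by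
        rw [List.pairwise_reverse]
        exact PySem.List.sorted_ofList_pairwise_lt _
      rw [List.pairwise_map]
      refine List.Pairwise.imp_of_mem ?_ hPlt
      intro v w _ _ hvw x hx y hy
      rw [hlex v x hx, hlex w y hy]
      rw [Prod.Lex.lt_iff]
      left
      simpa using hvw
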